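-- pv_equiv track=rewrite | github.com/jddunn/tenets | docs/gen_api.py | get_module_priority
-- ===== SOURCE A (Python) =====
-- def get_module_priority(module_name: str) -> int:
--     """Assign priority for navigation ordering."""
--     # Higher priority = appears first
--     priority_map = {
--         "tenets": 100,
--         "tenets.api": 95,
--         "tenets.config": 90,
--         "tenets.core": 85,
--         "tenets.core.distiller": 80,
--         "tenets.core.analysis": 75,
--         "tenets.core.ranking": 70,
--         "tenets.core.instiller": 68,
--         "tenets.core.git": 66,
--         "tenets.cli": 65,
--         "tenets.cli.commands": 60,
--         "tenets.models": 55,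
--         "tenets.storage": 50,
--         "tenets.utils": 45,
--         "tenets.viz": 40,
--     }
--
--     # Check exact match first
--     if module_name in priority_map:
--         return priority_map[module_name]
--
--     # Check prefix match for sub-modules
--     for prefix, priority in sorted(priority_map.items(), key=lambda x: -len(x[0])):
--         if module_name.startswith(prefix + "."):
--             # Sub-modules get slightly lower priority than parent
--             depth = module_name[len(prefix) :].count(".")
--             return priority - (depth * 2) - 1
--
--     return 0
-- ===== SOURCE B (Python) =====
-- def get_module_priority(module_name: str) -> int:
--     """Assign priority for navigation ordering."""
--     priority_map = {
--         "tenets": 100,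
--         "tenets.api": 95,
--         "tenets.config": 90,
--         "tenets.core": 85,
--         "tenets.core.distiller": 80,
--         "tenets.core.analysis": 75,
--         "tenets.core.ranking": 70,
--         "tenets.core.instiller": 68,
--         "tenets.core.git": 66,
--         "tenets.cli": 65,
--         "tenets.cli.commands": 60,
--         "tenets.models": 55,
--         "tenets.storage": 50,
--         "tenets.utils": 45,
--         "tenets.viz": 40,
--     }
--
--     # One pass, no sort: return on an exact match, otherwise remember the
--     # longest key that is a dot-boundary prefix of module_name.
--     best = None
--     for prefix, priority in priority_map.items():
--         if module_name == prefix: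
--             return priority
--         if module_name.startswith(prefix + ".") and (
--             best is None or len(prefix) > len(best[0])
--         ):
--             best = (prefix, priority)
--     if best is None:
--         return 0
--     prefix, priority = best
--     depth = module_name[len(prefix):].count(".")
--     return priority - depth * 2 - 1
-- ===== Notes on version B (the rewrite author's own statement) =====
-- stated objective: simpler
-- what changed: B replaces A's sort-the-whole-map-by-key-length-then-take-first-match scan by a single unsorted pass over the map that returns on an exact match and otherwise keeps the longest dot-boundary prefix seen.
import Mathlib
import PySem

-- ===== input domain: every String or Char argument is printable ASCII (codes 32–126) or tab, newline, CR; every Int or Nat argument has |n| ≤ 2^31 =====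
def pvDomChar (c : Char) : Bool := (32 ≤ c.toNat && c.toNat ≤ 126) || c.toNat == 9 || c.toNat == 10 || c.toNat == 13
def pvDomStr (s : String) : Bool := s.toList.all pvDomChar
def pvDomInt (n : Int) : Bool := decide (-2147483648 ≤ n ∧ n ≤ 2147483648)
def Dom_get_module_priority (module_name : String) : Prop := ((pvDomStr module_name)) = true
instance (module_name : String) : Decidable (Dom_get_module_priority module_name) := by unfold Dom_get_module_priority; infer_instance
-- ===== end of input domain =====

-- B replaces A's sort-the-map-then-first-match scan by a single unsorted pass that keeps the longest matching prefix (objective: simpler, no sort).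

-- ===== PORT A =====
def pvPriorityMap : PySem.Dict String Int :=
  PySem.Dict.ofList [("tenets", 100), ("tenets.api", 95), ("tenets.config", 90), ("tenets.core", 85), ("tenets.core.distiller", 80), ("tenets.core.analysis", 75), ("tenets.core.ranking", 70), ("tenets.core.instiller", 68), ("tenets.core.git", 66), ("tenets.cli", 65), ("tenets.cli.commands", 60), ("tenets.models", 55), ("tenets.storage", 50), ("tenets.utils", 45), ("tenets.viz", 40)]

-- A's for-loop over the length-sorted items: first prefix match wins
def pvScanA (s : String) : List (String × Int) → Int
  | [] => 0
  | (pfx, p) :: rest =>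
    if PySem.Str.startswith s (pfx ++ ".") then
      p - (PySem.Str.count (PySem.Str.slice s (some (PySem.Str.len pfx : Int)) none) "." : Int) * 2 - 1
    else pvScanA s rest

def get_module_priority (module_name : String) : Int :=
  match PySem.Dict.get? pvPriorityMap module_name with
  | some v => v
  | none =>
    pvScanA module_name
      (PySem.List.sorted (PySem.Dict.items pvPriorityMap) (fun x => -(PySem.Str.len x.1 : Int)) false)

-- ===== PORT B =====
def pvPairsB : List (String × Int) := [("tenets", 100), ("tenets.api", 95), ("tenets.config", 90), ("tenets.core", 85), ("tenets.core.distiller", 80), ("tenets.core.analysis", 75), ("tenets.core.ranking", 70), ("tenets.core.instiller", 68), ("tenets.core.git", 66), ("tenets.cli", 65), ("tenets.cli.commands", 60), ("tenets.models", 55), ("tenets.storage", 50), ("tenets.utils", 45), ("tenets.viz", 40)]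

-- 'if best is None: return 0' / final 'priority - depth*2 - 1' of B
def pvFinishB (s : String) : Option (String × Int) → Int
  | none => 0
  | some (pfx, p) =>
    p - (PySem.Str.count (PySem.Str.slice s (some (PySem.Str.len pfx : Int)) none) "." : Int) * 2 - 1

-- B's single pass: return on exact match, else keep the longest boundary prefix
def pvScanB (s : String) (best : Option (String × Int)) : List (String × Int) → Int
  | [] => pvFinishB s best
  | (pfx, p) :: rest =>
    if s == pfx then p
    else if PySem.Str.startswith s (pfx ++ ".")
            && (match best with
                | none => true
                | some (b, _) => decide (PySem.Str.len b < PySem.Str.len pfx)) then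
      pvScanB s (some (pfx, p)) rest
    else pvScanB s best rest

def get_module_priority_alt (module_name : String) : Int :=
  pvScanB module_name none pvPairsB

-- ===== PRECONDITION & SPEC =====
def Spec_get_module_priority (module_name : String) (out : Int) : Prop := out = get_module_priority_alt module_name
instance (module_name : String) (out : Int) : Decidable (Spec_get_module_priority module_name out) := by unfold Spec_get_module_priority; infer_instance

-- ===== CLAIM (what is proved, stated in full; the proofs are below) =====
def Claim_equal_get_module_priority : Prop := ∀ (module_name : String), Dom_get_module_priority module_name → Spec_get_module_priority module_name (get_module_priority module_name)

-- ===== LEMMAS AND PROOFS =====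

theorem pvSortedItems :
    PySem.List.sorted (PySem.Dict.items pvPriorityMap) (fun x => -(PySem.Str.len x.1 : Int)) false
      = [("tenets.core.distiller", 80), ("tenets.core.instiller", 68), ("tenets.core.analysis", 75), ("tenets.core.ranking", 70), ("tenets.cli.commands", 60), ("tenets.core.git", 66), ("tenets.storage", 50), ("tenets.config", 90), ("tenets.models", 55), ("tenets.utils", 45), ("tenets.core", 85), ("tenets.api", 95), ("tenets.cli", 65), ("tenets.viz", 40), ("tenets", 100)] := by decide

theorem pvMain (s : String) : get_module_priority s = get_module_priority_alt s := by
  by_cases e1 : s = "tenets"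
  · subst e1; decide
  by_cases e2 : s = "tenets.api"
  · subst e2; decide
  by_cases e3 : s = "tenets.config"
  · subst e3; decide
  by_cases e4 : s = "tenets.core"
  · subst e4; decide
  by_cases e5 : s = "tenets.core.distiller"
  · subst e5; decide
  by_cases e6 : s = "tenets.core.analysis"
  · subst e6; decide
  by_cases e7 : s = "tenets.core.ranking"
  · subst e7; decide
  by_cases e8 : s = "tenets.core.instiller"
  · subst e8; decide
  by_cases e9 : s = "tenets.core.git"
  · subst e9; decide
  by_cases e10 : s = "tenets.cli"
  · subst e10; decide
  by_cases e11 : s = "tenets.cli.commands"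
  · subst e11; decide
  by_cases e12 : s = "tenets.models"
  · subst e12; decide
  by_cases e13 : s = "tenets.storage"
  · subst e13; decide
  by_cases e14 : s = "tenets.utils"
  · subst e14; decide
  by_cases e15 : s = "tenets.viz"
  · subst e15; decide
  have hget : PySem.Dict.get? pvPriorityMap s = none := by
    have hpm : pvPriorityMap = PySem.Dict.mk [("tenets", 100), ("tenets.api", 95), ("tenets.config", 90), ("tenets.core", 85), ("tenets.core.distiller", 80), ("tenets.core.analysis", 75), ("tenets.core.ranking", 70), ("tenets.core.instiller", 68), ("tenets.core.git", 66), ("tenets.cli", 65), ("tenets.cli.commands", 60), ("tenets.models", 55), ("tenets.storage", 50), ("tenets.utils", 45), ("tenets.viz", 40)] := by decide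
    simp [hpm, PySem.Dict.get?, Ne.symm e1, Ne.symm e2, Ne.symm e3, Ne.symm e4, Ne.symm e5, Ne.symm e6, Ne.symm e7, Ne.symm e8, Ne.symm e9, Ne.symm e10, Ne.symm e11, Ne.symm e12, Ne.symm e13, Ne.symm e14, Ne.symm e15]
  simp only [get_module_priority, get_module_priority_alt, hget, pvSortedItems]
  by_cases m1 : PySem.Chars.startswith s.toList ['t', 'e', 'n', 'e', 't', 's', '.', 'c', 'o', 'r', 'e', '.', 'd', 'i', 's', 't', 'i', 'l', 'l', 'e', 'r', '.'] = true
  · simp [pvScanA, pvScanB, pvFinishB, pvPairsB, m1, e1, e2, e3, e4, e5, e6, e7, e8, e9, e10, e11, e12, e13, e14, e15]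
  by_cases m2 : PySem.Chars.startswith s.toList ['t', 'e', 'n', 'e', 't', 's', '.', 'c', 'o', 'r', 'e', '.', 'i', 'n', 's', 't', 'i', 'l', 'l', 'e', 'r', '.'] = true
  · simp [pvScanA, pvScanB, pvFinishB, pvPairsB, m1, m2, e1, e2, e3, e4, e5, e6, e7, e8, e9, e10, e11, e12, e13, e14, e15]
  by_cases m3 : PySem.Chars.startswith s.toList ['t', 'e', 'n', 'e', 't', 's', '.', 'c', 'o', 'r', 'e', '.', 'a', 'n', 'a', 'l', 'y', 's', 'i', 's', '.'] = true
  · simp [pvScanA, pvScanB, pvFinishB, pvPairsB, m1, m2, m3, e1, e2, e3, e4, e5, e6, e7, e8, e9, e10, e11, e12, e13, e14, e15]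
  by_cases m4 : PySem.Chars.startswith s.toList ['t', 'e', 'n', 'e', 't', 's', '.', 'c', 'o', 'r', 'e', '.', 'r', 'a', 'n', 'k', 'i', 'n', 'g', '.'] = true
  · simp [pvScanA, pvScanB, pvFinishB, pvPairsB, m1, m2, m3, m4, e1, e2, e3, e4, e5, e6, e7, e8, e9, e10, e11, e12, e13, e14, e15]
  by_cases m5 : PySem.Chars.startswith s.toList ['t', 'e', 'n', 'e', 't', 's', '.', 'c', 'l', 'i', '.', 'c', 'o', 'm', 'm', 'a', 'n', 'd', 's', '.'] = true
  · simp [pvScanA, pvScanB, pvFinishB, pvPairsB, m1, m2, m3, m4, m5, e1, e2, e3, e4, e5, e6, e7, e8, e9, e10, e11, e12, e13, e14, e15]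
  by_cases m6 : PySem.Chars.startswith s.toList ['t', 'e', 'n', 'e', 't', 's', '.', 'c', 'o', 'r', 'e', '.', 'g', 'i', 't', '.'] = true
  · simp [pvScanA, pvScanB, pvFinishB, pvPairsB, m1, m2, m3, m4, m5, m6, e1, e2, e3, e4, e5, e6, e7, e8, e9, e10, e11, e12, e13, e14, e15]
  by_cases m7 : PySem.Chars.startswith s.toList ['t', 'e', 'n', 'e', 't', 's', '.', 's', 't', 'o', 'r', 'a', 'g', 'e', '.'] = true
  · simp [pvScanA, pvScanB, pvFinishB, pvPairsB, m1, m2, m3, m4, m5, m6, m7, e1, e2, e3, e4, e5, e6, e7, e8, e9, e10, e11, e12, e13, e14, e15]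
  by_cases m8 : PySem.Chars.startswith s.toList ['t', 'e', 'n', 'e', 't', 's', '.', 'c', 'o', 'n', 'f', 'i', 'g', '.'] = true
  · simp [pvScanA, pvScanB, pvFinishB, pvPairsB, m1, m2, m3, m4, m5, m6, m7, m8, e1, e2, e3, e4, e5, e6, e7, e8, e9, e10, e11, e12, e13, e14, e15]
  by_cases m9 : PySem.Chars.startswith s.toList ['t', 'e', 'n', 'e', 't', 's', '.', 'm', 'o', 'd', 'e', 'l', 's', '.'] = true
  · simp [pvScanA, pvScanB, pvFinishB, pvPairsB, m1, m2, m3, m4, m5, m6, m7, m8, m9, e1, e2, e3, e4, e5, e6, e7, e8, e9, e10, e11, e12, e13, e14, e15]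
  by_cases m10 : PySem.Chars.startswith s.toList ['t', 'e', 'n', 'e', 't', 's', '.', 'u', 't', 'i', 'l', 's', '.'] = true
  · simp [pvScanA, pvScanB, pvFinishB, pvPairsB, m1, m2, m3, m4, m5, m6, m7, m8, m9, m10, e1, e2, e3, e4, e5, e6, e7, e8, e9, e10, e11, e12, e13, e14, e15]
  by_cases m11 : PySem.Chars.startswith s.toList ['t', 'e', 'n', 'e', 't', 's', '.', 'c', 'o', 'r', 'e', '.'] = true
  · simp [pvScanA, pvScanB, pvFinishB, pvPairsB, m1, m2, m3, m4, m5, m6, m7, m8, m9, m10, m11, e1, e2, e3, e4, e5, e6, e7, e8, e9, e10, e11, e12, e13, e14, e15]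
  by_cases m12 : PySem.Chars.startswith s.toList ['t', 'e', 'n', 'e', 't', 's', '.', 'a', 'p', 'i', '.'] = true
  · simp [pvScanA, pvScanB, pvFinishB, pvPairsB, m1, m2, m3, m4, m5, m6, m7, m8, m9, m10, m11, m12, e1, e2, e3, e4, e5, e6, e7, e8, e9, e10, e11, e12, e13, e14, e15]
  by_cases m13 : PySem.Chars.startswith s.toList ['t', 'e', 'n', 'e', 't', 's', '.', 'c', 'l', 'i', '.'] = true
  · simp [pvScanA, pvScanB, pvFinishB, pvPairsB, m1, m2, m3, m4, m5, m6, m7, m8, m9, m10, m11, m12, m13, e1, e2, e3, e4, e5, e6, e7, e8, e9, e10, e11, e12, e13, e14, e15]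
  by_cases m14 : PySem.Chars.startswith s.toList ['t', 'e', 'n', 'e', 't', 's', '.', 'v', 'i', 'z', '.'] = true
  · simp [pvScanA, pvScanB, pvFinishB, pvPairsB, m1, m2, m3, m4, m5, m6, m7, m8, m9, m10, m11, m12, m13, m14, e1, e2, e3, e4, e5, e6, e7, e8, e9, e10, e11, e12, e13, e14, e15]
  by_cases m15 : PySem.Chars.startswith s.toList ['t', 'e', 'n', 'e', 't', 's', '.'] = true
  · simp [pvScanA, pvScanB, pvFinishB, pvPairsB, m1, m2, m3, m4, m5, m6, m7, m8, m9, m10, m11, m12, m13, m14, m15, e1, e2, e3, e4, e5, e6, e7, e8, e9, e10, e11, e12, e13, e14, e15]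
  simp [pvScanA, pvScanB, pvFinishB, pvPairsB, m1, m2, m3, m4, m5, m6, m7, m8, m9, m10, m11, m12, m13, m14, m15, e1, e2, e3, e4, e5, e6, e7, e8, e9, e10, e11, e12, e13, e14, e15]

-- ===== VERDICT (by name: the statement is the Claim_ definition above) =====
theorem get_module_priority_spec : Claim_equal_get_module_priority := by
  intro s _
  unfold Spec_get_module_priority
  exact pvMain s
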